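-- pv_equiv track=rewrite | github.com/drgsl/B.Sc.ComputerScience-Archive | 5th Semester/Python Programming/FiIMaterials/Programare Python/Laborator/laborator_2021-2022/solutii/lab2/lab2.py | function4
-- ===== SOURCE A (Python) =====
-- def function4(musical_notes, list_of_moves, start_position):
--
--     new_list = [musical_notes[start_position]]
--
--     for move in list_of_moves:
--         if move < 0:
--             start_position -= (move + 1)
--             start_position = start_position % len(musical_notes)
--         else:
--             start_position = start_position + move
--             start_position = start_position % len(musical_notes)
--         new_list.append(musical_notes[start_position])
--     return new_list
-- ===== SOURCE B (Python) =====
-- def function4(musical_notes, list_of_moves, start_position):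
--     n = len(musical_notes)
--     deltas = [m if m >= 0 else -(m + 1) for m in list_of_moves]
--     total = start_position + sum(deltas)
--     out = []
--     for d in reversed(deltas):
--         out.append(musical_notes[total % n])
--         total -= d
--     out.append(musical_notes[start_position])
--     return out[::-1]
-- ===== Notes on version B (the rewrite author's own statement) =====
-- stated objective: alternative
-- what changed: B walks the moves BACKWARDS: it computes the final raw position once as start + sum of signed deltas, then traverses the reversed delta list emitting each note while subtracting its delta, and reverses the collected output at the end, instead of A's forward loop that re-reduces the position modulo len at every step.
import Mathlib
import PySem

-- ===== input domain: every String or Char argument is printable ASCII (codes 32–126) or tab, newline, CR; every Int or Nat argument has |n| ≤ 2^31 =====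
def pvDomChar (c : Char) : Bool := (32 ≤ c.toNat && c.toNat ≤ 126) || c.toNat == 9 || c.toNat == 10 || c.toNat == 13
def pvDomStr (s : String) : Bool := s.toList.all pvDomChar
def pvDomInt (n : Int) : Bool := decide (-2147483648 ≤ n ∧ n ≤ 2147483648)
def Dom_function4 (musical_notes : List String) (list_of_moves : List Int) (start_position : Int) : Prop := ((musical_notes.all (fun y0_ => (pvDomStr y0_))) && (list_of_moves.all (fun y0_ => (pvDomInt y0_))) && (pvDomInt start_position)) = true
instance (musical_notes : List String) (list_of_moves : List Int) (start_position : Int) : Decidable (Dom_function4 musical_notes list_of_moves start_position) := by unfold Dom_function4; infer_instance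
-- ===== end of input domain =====

-- B walks the moves backwards from the total raw displacement, emitting notes while
-- subtracting deltas, and reverses the output (alternative traversal, same cost).


-- ===== PORT A =====
-- Literal port of A: a fold carrying (new_list, start_position); the indexings are
-- totalized with getD "" — Pre_ excludes exactly the inputs where Python raises.
def function4 (musical_notes : List String) (list_of_moves : List Int) (start_position : Int) : List String :=
  (list_of_moves.foldl
    (fun (st : List String × Int) move =>
      let pos :=
        if move < 0 then
          PySem.Int.mod (st.2 - (move + 1)) (musical_notes.length : Int)
        else
          PySem.Int.mod (st.2 + move) (musical_notes.length : Int)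
      (st.1 ++ [(PySem.List.pyGet? musical_notes pos).getD ""], pos))
    ([(PySem.List.pyGet? musical_notes start_position).getD ""], start_position)).1

-- ===== PORT B =====
-- Literal port of Source B: deltas by a map; total = start + sum; backward loop over
-- reversed deltas carrying (out, total), emitting before subtracting; trailing raw
-- first note; final reverse (out[::-1]).
def function4_alt (musical_notes : List String) (list_of_moves : List Int) (start_position : Int) : List String :=
  (((list_of_moves.map (fun m => if m ≥ 0 then m else -(m + 1))).reverse.foldl
      (fun (st : List String × Int) d =>
        (st.1 ++ [(PySem.List.pyGet? musical_notes (PySem.Int.mod st.2 (musical_notes.length : Int))).getD ""], st.2 - d))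
      ([], start_position + (list_of_moves.map (fun m => if m ≥ 0 then m else -(m + 1))).sum)).1
    ++ [(PySem.List.pyGet? musical_notes start_position).getD ""]).reverse

-- ===== PRECONDITION & SPEC =====
-- Pre_: Python A raises IndexError on its first line iff start_position is out of
-- range for musical_notes (this also forces musical_notes ≠ []); nothing else raises.
def Pre_function4 (musical_notes : List String) (list_of_moves : List Int) (start_position : Int) : Prop :=
  PySem.Raise.InRange musical_notes.length start_position
instance (musical_notes : List String) (list_of_moves : List Int) (start_position : Int) : Decidable (Pre_function4 musical_notes list_of_moves start_position) := by unfold Pre_function4; infer_instance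

def pvWitness_function4 : List String × List Int × Int := (["do", "re", "mi"], [2, -3, 0], 1)

def Spec_function4 (musical_notes : List String) (list_of_moves : List Int) (start_position : Int) (out : List String) : Prop := out = function4_alt musical_notes list_of_moves start_position
instance (musical_notes : List String) (list_of_moves : List Int) (start_position : Int) (out : List String) : Decidable (Spec_function4 musical_notes list_of_moves start_position out) := by unfold Spec_function4; infer_instance

-- ===== CLAIM (what is proved, stated in full; the proofs are below) =====
def Claim_equal_function4 : Prop := ∀ (musical_notes : List String) (list_of_moves : List Int) (start_position : Int), Dom_function4 musical_notes list_of_moves start_position → Pre_function4 musical_notes list_of_moves start_position → Spec_function4 musical_notes list_of_moves start_position (function4 musical_notes list_of_moves start_position)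

-- ===== LEMMAS AND PROOFS =====

-- proof-only helper: raw prefix sums of the signed deltas of the moves
def pvSums (s : Int) (moves : List Int) : List Int :=
  match moves with
  | [] => []
  | m :: ms =>
    let s2 := s + (if m ≥ 0 then m else -(m + 1))
    s2 :: pvSums s2 ms

-- proof-only helper: raw prefix sums of a delta list
def pvSumsD (s : Int) (ds : List Int) : List Int :=
  match ds with
  | [] => []
  | d :: ds => (s + d) :: pvSumsD (s + d) ds

-- proof-only helper: the emission list of B's backward loop (last-emitted last)
def pvEmits (f : Int → String) (s : Int) (ds : List Int) : List String :=
  match ds with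
  | [] => []
  | d :: ds => pvEmits f (s + d) ds ++ [f (s + d)]

-- prefix sums of the mapped deltas are the prefix sums pvSums of the moves
theorem pvSumsD_map (moves : List Int) :
    ∀ s : Int, pvSumsD s (moves.map (fun m => if m ≥ 0 then m else -(m + 1))) = pvSums s moves := by
  induction moves with
  | nil => intro s; simp [pvSumsD, pvSums]
  | cons m ms ih =>
    intro s
    simp only [List.map_cons, pvSumsD, pvSums]
    rw [ih]

-- B's backward fold over ds.reverse, seeded with s + ds.sum, emits pvEmits and ends at s
theorem pvFoldB_eq (f : Int → String) (ds : List Int) :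
    ∀ (acc : List String) (s : Int),
      (ds.reverse.foldl
        (fun (st : List String × Int) d => (st.1 ++ [f st.2], st.2 - d))
        (acc, s + ds.sum))
      = (acc ++ pvEmits f s ds, s) := by
  induction ds with
  | nil => intro acc s; simp [pvEmits]
  | cons d ds ih =>
    intro acc s
    have hs : s + (d :: ds).sum = (s + d) + ds.sum := by simp; ring
    rw [List.reverse_cons, List.foldl_append, hs, ih acc (s + d)]
    simp [pvEmits]

-- reversing the emissions gives the notes at the prefix sums, in forward order
theorem pvEmits_reverse (f : Int → String) (ds : List Int) :
    ∀ s : Int, (pvEmits f s ds).reverse = (pvSumsD s ds).map f := by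
  induction ds with
  | nil => intro s; simp [pvEmits, pvSumsD]
  | cons d ds ih => intro s; simp [pvEmits, pvSumsD, ih]

-- A's fold produces the accumulator followed by the notes at the prefix sums of the moves
theorem pvFold_eq (notes : List String) (hne : notes ≠ [])
    (moves : List Int) :
    ∀ (acc : List String) (p1 p2 : Int),
      PySem.Int.mod p1 (notes.length : Int) = PySem.Int.mod p2 (notes.length : Int) →
      (moves.foldl
        (fun (st : List String × Int) move =>
          let pos :=
            if move < 0 then
              PySem.Int.mod (st.2 - (move + 1)) (notes.length : Int)
            else
              PySem.Int.mod (st.2 + move) (notes.length : Int)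
          (st.1 ++ [(PySem.List.pyGet? notes pos).getD ""], pos))
        (acc, p1)).1
      = acc ++ (pvSums p2 moves).map
          (fun p => (PySem.List.pyGet? notes (PySem.Int.mod p (notes.length : Int))).getD "") := by
  have hn : (0 : Int) < (notes.length : Int) := by
    have : notes.length ≠ 0 := fun h => hne (List.eq_nil_of_length_eq_zero h)
    omega
  induction moves with
  | nil => intro acc p1 p2 _; simp [pvSums]
  | cons m ms ih =>
    intro acc p1 p2 hcong
    have hstep' : (if m < 0 then PySem.Int.mod (p1 - (m + 1)) (notes.length : Int)
        else PySem.Int.mod (p1 + m) (notes.length : Int))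
        = PySem.Int.mod (p2 + (if m ≥ 0 then m else -(m + 1))) (notes.length : Int) := by
      simp only [PySem.Int.mod_eq_emod_of_pos hn] at hcong ⊢
      split_ifs with h1 h2
      · omega
      · have hr : p2 + -(m + 1) = p2 - (m + 1) := by ring
        rw [hr, Int.sub_emod, hcong, ← Int.sub_emod]
      · rw [Int.add_emod, hcong, ← Int.add_emod]
      · omega
    have hidem :
        PySem.Int.mod (PySem.Int.mod (p2 + (if m ≥ 0 then m else -(m + 1))) (notes.length : Int)) (notes.length : Int)
        = PySem.Int.mod (p2 + (if m ≥ 0 then m else -(m + 1))) (notes.length : Int) := by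
      simp only [PySem.Int.mod_eq_emod_of_pos hn]
      exact Int.emod_emod_of_dvd _ dvd_rfl
    simp only [List.foldl_cons, pvSums, List.map_cons]
    rw [hstep', ih _ _ (p2 + (if m ≥ 0 then m else -(m + 1))) hidem]
    simp [List.append_assoc]

-- ===== VERDICT (by name: the statement is the Claim_ definition above) =====
theorem function4_spec : Claim_equal_function4 := by
  intro notes moves sp _ hpre
  have hne : notes ≠ [] := by
    intro h
    subst h
    unfold Pre_function4 PySem.Raise.InRange at hpre
    simp at hpre
    omega
  unfold Spec_function4 function4 function4_alt
  rw [pvFold_eq notes hne moves _ sp sp rfl]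
  rw [pvFoldB_eq (fun p => (PySem.List.pyGet? notes (PySem.Int.mod p (notes.length : Int))).getD "")
        (moves.map (fun m => if m ≥ 0 then m else -(m + 1))) [] sp]
  rw [List.nil_append, List.reverse_append, pvEmits_reverse, pvSumsD_map]
  simp
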